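-- pv_equiv track=rewrite | github.com/gyrogovernance/superintelligence | secret_lab_ignore/gyrocrypt/sha256_structure.py | _add_chain_carries
-- ===== SOURCE A (Python) =====
-- from typing import Any, Sequence
--
-- _MASK32 = 0xFFFFFFFF
--
-- _MASK16 = 0xFFFF
--
-- def _add_chain_carries(values: Sequence[int]) -> tuple[int, int, list[int], list[int], list[int]]:
--     """
--     Add a chain of u32 values left-to-right and return:
--     (final, low16_carry_count, low16_carries, high16_carries, sums).
--     """
--     if len(values) < 2:
--         raise ValueError("Need at least two values in add chain")
--     acc = int(values[0]) & _MASK32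
--     low_carries: list[int] = []
--     high_carries: list[int] = []
--     sums: list[int] = []
--     for nxt in values[1:]:
--         right = int(nxt) & _MASK32
--         low_sum = (acc & _MASK16) + (right & _MASK16)
--         carry_low = 1 if low_sum > _MASK16 else 0
--         high_sum = (acc >> 16) + (right >> 16) + carry_low
--         carry_high = 1 if high_sum > _MASK16 else 0
--         acc = (low_sum & _MASK16) | ((high_sum & _MASK16) << 16)
--         low_carries.append(carry_low)
--         high_carries.append(carry_high)
--         sums.append(acc)
--     return acc, int(sum(low_carries)), low_carries, high_carries, sums
-- ===== SOURCE B (Python) =====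
-- from itertools import accumulate
-- from typing import Sequence
--
-- _MASK32 = 0xFFFFFFFF
-- _MASK16 = 0xFFFF
--
-- def _add_chain_carries(values: Sequence[int]) -> tuple[int, int, list[int], list[int], list[int]]:
--     if len(values) < 2:
--         raise ValueError("Need at least two values in add chain")
--     vals = [int(v) & _MASK32 for v in values]
--     accs = list(accumulate(vals, lambda a, b: (a + b) & _MASK32))
--     sums = accs[1:]
--     low_carries = [((p & _MASK16) + (v & _MASK16)) >> 16 for p, v in zip(accs, vals[1:])]
--     high_carries = [(p + v) >> 32 for p, v in zip(accs, vals[1:])]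
--     return accs[-1], sum(low_carries), low_carries, high_carries, sums
-- ===== Notes on version B (the rewrite author's own statement) =====
-- stated objective: alternative
-- what changed: B first builds the whole chain of masked accumulators with itertools.accumulate, then derives each low/high carry arithmetically ((p&0xFFFF + v&0xFFFF)>>16 and (p+v)>>32) in zip/comprehension passes over consecutive accumulator pairs, instead of A's single loop that propagates carries through explicit 16-bit half-word sums.
import Mathlib
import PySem

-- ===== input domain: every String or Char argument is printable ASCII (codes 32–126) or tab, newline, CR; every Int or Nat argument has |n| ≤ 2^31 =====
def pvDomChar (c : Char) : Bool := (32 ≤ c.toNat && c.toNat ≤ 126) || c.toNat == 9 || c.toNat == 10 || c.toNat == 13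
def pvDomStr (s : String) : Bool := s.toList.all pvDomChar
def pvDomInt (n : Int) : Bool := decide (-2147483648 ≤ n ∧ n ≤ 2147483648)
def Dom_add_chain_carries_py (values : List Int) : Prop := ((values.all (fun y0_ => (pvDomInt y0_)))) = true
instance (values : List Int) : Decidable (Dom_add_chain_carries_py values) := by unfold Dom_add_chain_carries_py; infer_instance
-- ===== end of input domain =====

-- B replaces A's single carry-propagating loop by an accumulate pass (masked running sums)
-- followed by zip/map passes deriving each carry arithmetically from consecutive accumulators
-- (objective: alternative decomposition, same O(n) cost). Both Pythons raise ValueError on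
-- fewer than two values; Pre_ excludes exactly those inputs.


-- x & 0xFFFFFFFF on a Python int = x mod 2^32 (exact, incl. negatives: two's complement)
def pvMask32 (x : Int) : Int := PySem.Int.mod x 4294967296

-- ===== PORT A =====
-- inside the loop acc and right are nonnegative, so Python's '& 0xFFFF', '>> 16' and the
-- disjoint '|' are exactly mod 65536, floordiv 65536 and addition
def aLoop (acc : Int) (rest : List Int) : Int × List Int × List Int × List Int :=
  match rest with
  | [] => (acc, [], [], [])
  | nxt :: rest =>
    let right := pvMask32 nxt
    let low_sum := PySem.Int.mod acc 65536 + PySem.Int.mod right 65536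
    let carry_low : Int := if low_sum > 65535 then 1 else 0
    let high_sum := PySem.Int.floordiv acc 65536 + PySem.Int.floordiv right 65536 + carry_low
    let carry_high : Int := if high_sum > 65535 then 1 else 0
    let acc' := PySem.Int.mod low_sum 65536 + PySem.Int.mod high_sum 65536 * 65536
    let r := aLoop acc' rest
    (r.1, carry_low :: r.2.1, carry_high :: r.2.2.1, acc' :: r.2.2.2)

def add_chain_carries_py (values : List Int) : Int × Int × List Int × List Int × List Int :=
  match values with
  | [] => (0, 0, [], [], [])   -- unreachable under Pre_ (Python raises ValueError)
  | v0 :: rest =>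
    let acc := pvMask32 v0
    let r := aLoop acc rest
    (r.1, r.2.1.foldl (· + ·) 0, r.2.1, r.2.2.1, r.2.2.2)

-- ===== PORT B =====
-- itertools.accumulate with f(a,b) = (a+b) & _MASK32
def bAccum (a : Int) (vs : List Int) : List Int :=
  match vs with
  | [] => [a]
  | v :: vs => a :: bAccum (pvMask32 (a + v)) vs

def bLow (p v : Int) : Int := PySem.Int.floordiv (PySem.Int.mod p 65536 + PySem.Int.mod v 65536) 65536
def bHigh (p v : Int) : Int := PySem.Int.floordiv (p + v) 4294967296

def add_chain_carries_py_alt (values : List Int) : Int × Int × List Int × List Int × List Int :=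
  match values with
  | [] => (0, 0, [], [], [])   -- unreachable under Pre_ (Python raises ValueError)
  | v0 :: rest =>
    let vals := pvMask32 v0 :: rest.map pvMask32
    let accs := bAccum (pvMask32 v0) (rest.map pvMask32)
    let sums := accs.tail
    let pairs := accs.zip vals.tail
    let low_carries := pairs.map (fun pv => bLow pv.1 pv.2)
    let high_carries := pairs.map (fun pv => bHigh pv.1 pv.2)
    (accs.getLastD 0, low_carries.foldl (· + ·) 0, low_carries, high_carries, sums)

-- ===== PRECONDITION & SPEC =====
-- Python A raises ValueError on fewer than two values; exactly those inputs are excluded.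
def Pre_add_chain_carries_py (values : List Int) : Prop := 2 ≤ values.length
instance (values : List Int) : Decidable (Pre_add_chain_carries_py values) := by unfold Pre_add_chain_carries_py; infer_instance
def pvWitness_add_chain_carries_py : List Int := [65535, 1, 2147483647]

def Spec_add_chain_carries_py (values : List Int) (out : Int × Int × List Int × List Int × List Int) : Prop := out = add_chain_carries_py_alt values
instance (values : List Int) (out : Int × Int × List Int × List Int × List Int) : Decidable (Spec_add_chain_carries_py values out) := by unfold Spec_add_chain_carries_py; infer_instance

-- ===== CLAIM (what is proved, stated in full; the proofs are below) =====
def Claim_equal_add_chain_carries_py : Prop := ∀ (values : List Int), Dom_add_chain_carries_py values → Pre_add_chain_carries_py values → Spec_add_chain_carries_py values (add_chain_carries_py values)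

-- ===== LEMMAS AND PROOFS =====

theorem mask32_bounds (x : Int) : 0 ≤ pvMask32 x ∧ pvMask32 x < 4294967296 := by
  unfold pvMask32
  rw [PySem.Int.mod_eq_emod_of_pos (by norm_num : (0:Int) < 4294967296)]
  omega

-- one step of A's loop, against B's arithmetic characterisations
theorem step_eq (a r : Int) (ha : 0 ≤ a ∧ a < 4294967296) (hr : 0 ≤ r ∧ r < 4294967296) :
    (if PySem.Int.mod a 65536 + PySem.Int.mod r 65536 > 65535 then (1:Int) else 0) = bLow a r ∧
    (if PySem.Int.floordiv a 65536 + PySem.Int.floordiv r 65536 +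
        (if PySem.Int.mod a 65536 + PySem.Int.mod r 65536 > 65535 then (1:Int) else 0) > 65535
      then (1:Int) else 0) = bHigh a r ∧
    PySem.Int.mod (PySem.Int.mod a 65536 + PySem.Int.mod r 65536) 65536 +
      PySem.Int.mod (PySem.Int.floordiv a 65536 + PySem.Int.floordiv r 65536 +
        (if PySem.Int.mod a 65536 + PySem.Int.mod r 65536 > 65535 then (1:Int) else 0)) 65536 * 65536
      = pvMask32 (a + r) := by
  unfold bLow bHigh pvMask32
  simp only [PySem.Int.mod_eq_emod_of_pos (by norm_num : (0:Int) < 65536),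
    PySem.Int.mod_eq_emod_of_pos (by norm_num : (0:Int) < 4294967296),
    PySem.Int.floordiv_eq_ediv_of_pos (by norm_num : (0:Int) < 65536),
    PySem.Int.floordiv_eq_ediv_of_pos (by norm_num : (0:Int) < 4294967296)]
  split_ifs with h <;> omega

theorem bAccum_ne_nil (x : Int) (l : List Int) : bAccum x l ≠ [] := by
  cases l <;> simp [bAccum]

theorem getLastD_irrel (l : List Int) (h : l ≠ []) (d d' : Int) : l.getLastD d = l.getLastD d' := by
  cases l with
  | nil => exact absurd rfl h
  | cons x xs => simp [List.getLastD_eq_getLast?, List.getLast?_cons]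

theorem chain_eq (rest : List Int) (a : Int) (ha : 0 ≤ a ∧ a < 4294967296) :
    aLoop a rest =
      ((bAccum a (rest.map pvMask32)).getLastD 0,
       ((bAccum a (rest.map pvMask32)).zip (rest.map pvMask32)).map (fun pv => bLow pv.1 pv.2),
       ((bAccum a (rest.map pvMask32)).zip (rest.map pvMask32)).map (fun pv => bHigh pv.1 pv.2),
       (bAccum a (rest.map pvMask32)).tail) := by
  induction rest generalizing a with
  | nil => simp [aLoop, bAccum]
  | cons v rest ih =>
    have hr := mask32_bounds v
    have hstep := step_eq a (pvMask32 v) ha hr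
    have ha' := mask32_bounds (a + pvMask32 v)
    simp only [aLoop, List.map_cons, bAccum, List.zip_cons_cons, List.map_cons, List.tail_cons]
    rw [hstep.2.2, hstep.2.1, hstep.1, ih (pvMask32 (a + pvMask32 v)) ha']
    have hne : bAccum (pvMask32 (a + pvMask32 v)) (rest.map pvMask32) ≠ [] := bAccum_ne_nil _ _
    refine Prod.ext ?_ (Prod.ext rfl (Prod.ext rfl ?_))
    · rw [List.getLastD_cons]
      exact getLastD_irrel _ hne _ _
    · cases rest <;> simp [bAccum]

-- ===== VERDICT (by name: the statement is the Claim_ definition above) =====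
theorem add_chain_carries_py_spec : Claim_equal_add_chain_carries_py := by
  intro values _ hpre
  unfold Spec_add_chain_carries_py
  match values with
  | [] => simp [Pre_add_chain_carries_py] at hpre
  | v0 :: rest =>
    simp only [add_chain_carries_py, add_chain_carries_py_alt, List.tail_cons]
    rw [chain_eq rest (pvMask32 v0) (mask32_bounds v0)]
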